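-- pv_equiv track=rewrite | github.com/TiagoIA-UX/UNI-IA | ai-sentinel/run_risk_filter_aggregation.py | _acceptance_gates
-- ===== SOURCE A (Python) =====
-- from collections import defaultdict
-- from typing import Any, Dict, List, Tuple
--
-- VERSION_METADATA: Dict[str, Dict[str, str]] = {
--     "v1": {"regime": "Adverso descendente", "expected_classification": "RISK_FILTER_PROTECTIVE"},
--     "v2": {"regime": "Tendencial favoravel", "expected_classification": "NEUTRAL"},
--     "v3": {"regime": "Lateral com ruido", "expected_classification": "RISK_FILTER_PROTECTIVE"},
--     "v4": {"regime": "Volatilidade extrema", "expected_classification": "RISK_FILTER_PROTECTIVE"},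
-- }
--
-- def _acceptance_gates(records: List[Dict[str, Any]]) -> List[Dict[str, Any]]:
--     by_version: Dict[str, List[Dict[str, Any]]] = defaultdict(list)
--     for record in records:
--         by_version[str(record.get("version", "unknown"))].append(record)
--
--     gates: List[Dict[str, Any]] = []
--     for version, meta in VERSION_METADATA.items():
--         items = by_version.get(version, [])
--         if not items:
--             gates.append(
--                 {
--                     "id": f"acceptance:{version}",
--                     "version": version,
--                     "label": f"{version} - {meta['regime']}",
--                     "status": "FAIL",
--                     "tone": "fail",
--                     "expected_classification": meta["expected_classification"],
--                     "observed_classification": "MISSING",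
--                     "reason": "missing_version_in_series",
--                 }
--             )
--             continue
--
--         classifications = sorted({str(item.get("classification", "UNKNOWN")) for item in items})
--         if len(classifications) != 1:
--             gates.append(
--                 {
--                     "id": f"acceptance:{version}",
--                     "version": version,
--                     "label": f"{version} - {meta['regime']}",
--                     "status": "FAIL",
--                     "tone": "fail",
--                     "expected_classification": meta["expected_classification"],
--                     "observed_classification": "MIXED",
--                     "reason": f"mixed_classification:{'|'.join(classifications)}",
--                 }
--             )
--             continue
--
--         observed = classifications[0]
--         status = "PASS" if observed == meta["expected_classification"] else "FAIL"
--         gates.append(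
--             {
--                 "id": f"acceptance:{version}",
--                 "version": version,
--                 "label": f"{version} - {meta['regime']}",
--                 "status": status,
--                 "tone": "pass" if status == "PASS" else "fail",
--                 "expected_classification": meta["expected_classification"],
--                 "observed_classification": observed,
--                 "reason": None if status == "PASS" else "classification_mismatch",
--             }
--         )
--
--     return gates
-- ===== SOURCE B (Python) =====
-- VERSION_METADATA = {
--     "v1": {"regime": "Adverso descendente", "expected_classification": "RISK_FILTER_PROTECTIVE"},
--     "v2": {"regime": "Tendencial favoravel", "expected_classification": "NEUTRAL"},
--     "v3": {"regime": "Lateral com ruido", "expected_classification": "RISK_FILTER_PROTECTIVE"},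
--     "v4": {"regime": "Volatilidade extrema", "expected_classification": "RISK_FILTER_PROTECTIVE"},
-- }
--
-- def _acceptance_gates(records):
--     gates = []
--     for version, meta in VERSION_METADATA.items():
--         cls = sorted({
--             str(item.get("classification", "UNKNOWN"))
--             for item in records
--             if str(item.get("version", "unknown")) == version
--         })
--         if not cls:
--             status, observed, reason = "FAIL", "MISSING", "missing_version_in_series"
--         elif len(cls) > 1:
--             status, observed, reason = "FAIL", "MIXED", "mixed_classification:" + "|".join(cls)
--         elif cls[0] == meta["expected_classification"]:
--             status, observed, reason = "PASS", cls[0], None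
--         else:
--             status, observed, reason = "FAIL", cls[0], "classification_mismatch"
--         gates.append({
--             "id": f"acceptance:{version}",
--             "version": version,
--             "label": f"{version} - {meta['regime']}",
--             "status": status,
--             "tone": "pass" if status == "PASS" else "fail",
--             "expected_classification": meta["expected_classification"],
--             "observed_classification": observed,
--             "reason": reason,
--         })
--     return gates
-- ===== Notes on version B (the rewrite author's own statement) =====
-- stated objective: alternative
-- what changed: Drops the defaultdict pre-grouping pass: B scans records once per version building the classification set directly via a filtered set comprehension, and replaces the three separate gate-dict literals by one dict template filled from a computed (status, observed, reason) triple.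
import Mathlib
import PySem

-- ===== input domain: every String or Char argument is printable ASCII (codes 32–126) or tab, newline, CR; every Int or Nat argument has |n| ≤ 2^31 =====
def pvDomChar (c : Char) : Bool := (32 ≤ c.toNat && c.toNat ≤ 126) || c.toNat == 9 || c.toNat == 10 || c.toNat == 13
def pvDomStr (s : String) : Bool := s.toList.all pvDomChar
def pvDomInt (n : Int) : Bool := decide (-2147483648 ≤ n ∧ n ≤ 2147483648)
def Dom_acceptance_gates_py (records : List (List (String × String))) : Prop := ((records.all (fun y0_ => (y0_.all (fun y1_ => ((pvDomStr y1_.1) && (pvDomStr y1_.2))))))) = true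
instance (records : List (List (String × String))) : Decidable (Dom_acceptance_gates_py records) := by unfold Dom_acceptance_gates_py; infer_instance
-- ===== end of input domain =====

-- B drops A's defaultdict pre-grouping pass (per-version filtered set comprehensions instead)
-- and replaces the three gate-dict literals by one template filled from a computed triple;
-- same values, no speed claim (alternative decomposition).

-- record.get(k, dflt): a record is an association list, lookup = first match
def pvGet (r : List (String × String)) (k dflt : String) : String :=
  (((r.find? (fun p => p.1 == k)).map Prod.snd).getD dflt)

-- VERSION_METADATA.items(): (version, regime, expected_classification), in insertion order
def pvMeta : List (String × String × String) :=
  [("v1", "Adverso descendente", "RISK_FILTER_PROTECTIVE"),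
   ("v2", "Tendencial favoravel", "NEUTRAL"),
   ("v3", "Lateral com ruido", "RISK_FILTER_PROTECTIVE"),
   ("v4", "Volatilidade extrema", "RISK_FILTER_PROTECTIVE")]

-- ===== PORT A =====
def acceptance_gates_py (records : List (List (String × String))) : List (List (String × Option String)) :=
  -- by_version[str(record.get("version","unknown"))].append(record)
  let by_version : PySem.Dict String (List (List (String × String))) :=
    records.foldl (fun d r => d.modify (pvGet r "version" "unknown") [] (fun l => l ++ [r]))
      PySem.Dict.empty
  pvMeta.foldl (fun gates vm =>
    let version := vm.1
    let regime := vm.2.1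
    let expected := vm.2.2
    let items := by_version.getD version []
    if items = [] then
      gates ++ [[("id", some ("acceptance:" ++ version)),
                 ("version", some version),
                 ("label", some (version ++ " - " ++ regime)),
                 ("status", some "FAIL"),
                 ("tone", some "fail"),
                 ("expected_classification", some expected),
                 ("observed_classification", some "MISSING"),
                 ("reason", some "missing_version_in_series")]]
    else
      let classifications :=
        PySem.List.sorted
          (PySem.Set.ofList (items.map (fun it => pvGet it "classification" "UNKNOWN")))
          (fun x => x) false
      if classifications.length ≠ 1 then
        gates ++ [[("id", some ("acceptance:" ++ version)),
                   ("version", some version),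
                   ("label", some (version ++ " - " ++ regime)),
                   ("status", some "FAIL"),
                   ("tone", some "fail"),
                   ("expected_classification", some expected),
                   ("observed_classification", some "MIXED"),
                   ("reason", some ("mixed_classification:" ++ PySem.Str.join "|" classifications))]]
      else
        let observed := classifications.headD ""  -- classifications[0]; nonempty since length = 1
        let status := if observed = expected then "PASS" else "FAIL"
        gates ++ [[("id", some ("acceptance:" ++ version)),
                   ("version", some version),
                   ("label", some (version ++ " - " ++ regime)),
                   ("status", some status),
                   ("tone", some (if status = "PASS" then "pass" else "fail")),
                   ("expected_classification", some expected),
                   ("observed_classification", some observed),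
                   ("reason", if status = "PASS" then none else some "classification_mismatch")]])
    []

-- ===== PORT B =====
def acceptance_gates_py_alt (records : List (List (String × String))) : List (List (String × Option String)) :=
  pvMeta.foldl (fun gates vm =>
    let version := vm.1
    -- cls = sorted({str(item.get("classification","UNKNOWN")) for item in records
    --               if str(item.get("version","unknown")) == version})
    let cls :=
      PySem.List.sorted
        (PySem.Set.ofList
          ((records.filter (fun item => pvGet item "version" "unknown" == version)).map
            (fun item => pvGet item "classification" "UNKNOWN")))
        (fun x => x) false
    let sor : String × String × Option String :=
      if cls = [] then ("FAIL", "MISSING", some "missing_version_in_series")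
      else if 1 < cls.length then
        ("FAIL", "MIXED", some ("mixed_classification:" ++ PySem.Str.join "|" cls))
      else if cls.headD "" = vm.2.2 then ("PASS", cls.headD "", none)
      else ("FAIL", cls.headD "", some "classification_mismatch")
    gates ++ [[("id", some ("acceptance:" ++ version)),
               ("version", some version),
               ("label", some (version ++ " - " ++ vm.2.1)),
               ("status", some sor.1),
               ("tone", some (if sor.1 = "PASS" then "pass" else "fail")),
               ("expected_classification", some vm.2.2),
               ("observed_classification", some sor.2.1),
               ("reason", sor.2.2)]])
    []

-- ===== PRECONDITION & SPEC =====
def Spec_acceptance_gates_py (records : List (List (String × String))) (out : List (List (String × Option String))) : Prop := out = acceptance_gates_py_alt records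
instance (records : List (List (String × String))) (out : List (List (String × Option String))) : Decidable (Spec_acceptance_gates_py records out) := by unfold Spec_acceptance_gates_py; infer_instance

-- ===== CLAIM (what is proved, stated in full; the proofs are below) =====
def Claim_equal_acceptance_gates_py : Prop := ∀ (records : List (List (String × String))), Dom_acceptance_gates_py records → Spec_acceptance_gates_py records (acceptance_gates_py records)

-- ===== LEMMAS AND PROOFS =====

-- A's grouping dict looked up at v is exactly the per-version filtered record list
theorem pv_group_getD (records : List (List (String × String))) (v : String) :
    (records.foldl (fun d r => d.modify (pvGet r "version" "unknown") [] (fun l => l ++ [r]))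
      (PySem.Dict.empty : PySem.Dict String (List (List (String × String))))).getD v []
    = records.filter (fun r => pvGet r "version" "unknown" == v) := by
  have h := PySem.Dict.getD_foldl_modify_append
    (l := records.map (fun r => (pvGet r "version" "unknown", r)))
    (d := (PySem.Dict.empty : PySem.Dict String (List (List (String × String))))) (c := v)
  rw [List.foldl_map] at h
  rw [h]
  simp [List.filter_map, List.map_map, Function.comp_def, PySem.Dict.getD_empty]

theorem acceptance_gates_py_spec : Claim_equal_acceptance_gates_py := by
  intro records _
  unfold Spec_acceptance_gates_py acceptance_gates_py acceptance_gates_py_alt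
  dsimp only
  apply PySem.List.foldl_congr_mem
  intro gates vm _
  simp only [pv_group_getD]
  by_cases hE : List.filter (fun r => pvGet r "version" "unknown" == vm.1) records = []
  · simp [hE, PySem.List.sorted_eq_nil_iff]
  · obtain ⟨x, hx⟩ := List.exists_mem_of_ne_nil _ hE
    have hmem : pvGet x "classification" "UNKNOWN" ∈
        PySem.List.sorted
          (PySem.Set.ofList
            ((records.filter (fun item => pvGet item "version" "unknown" == vm.1)).map
              (fun it => pvGet it "classification" "UNKNOWN")))
          (fun x => x) false := by
      rw [PySem.List.mem_sorted, PySem.Set.mem_ofList]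
      exact List.mem_map_of_mem hx
    cases hcls : PySem.List.sorted
        (PySem.Set.ofList
          ((records.filter (fun item => pvGet item "version" "unknown" == vm.1)).map
            (fun it => pvGet it "classification" "UNKNOWN")))
        (fun x => x) false with
    | nil => rw [hcls] at hmem; simp at hmem
    | cons c t =>
      cases t with
      | nil => by_cases hc : c = vm.2.2 <;> simp [hE, hc]
      | cons c2 t2 => simp [hE]
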